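-- pv_equiv track=rewrite | github.com/jpribeir/AdventCalender2023 | src/day14.py | tiltMap
-- ===== SOURCE A (Python) =====
-- def tiltMap(input_map):
--     output_map = [""]*len(input_map)
--     for i,line in enumerate(input_map):
--         for part in line.split("#"):
--             rock_count = part.count("O")
--             output_map[i] = output_map[i]+("O"*rock_count)+("."*(len(part)-rock_count))+"#"
--         output_map[i] = output_map[i][:-1]
--     return output_map
-- ===== SOURCE B (Python) =====
-- def tiltMap(input_map):
--     result = []
--     for line in input_map:
--         pieces = []
--         rocks = 0
--         gaps = 0
--         for ch in line:
--             if ch == '#':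
--                 pieces.append("O" * rocks + "." * gaps + "#")
--                 rocks = 0
--                 gaps = 0
--             elif ch == 'O':
--                 rocks += 1
--             else:
--                 gaps += 1
--         pieces.append("O" * rocks + "." * gaps)
--         result.append("".join(pieces))
--     return result
-- ===== Notes on version B (the rewrite author's own statement) =====
-- stated objective: idiomatic
-- what changed: Replaces the split('#')/count('O')/string-repeat/slice-off-trailing-'#' reconstruction with a single left-to-right pass per line that keeps rock/gap counters and flushes a segment at each '#', joining the pieces at the end; no split, no count, no trailing-separator trick.
import Mathlib
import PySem

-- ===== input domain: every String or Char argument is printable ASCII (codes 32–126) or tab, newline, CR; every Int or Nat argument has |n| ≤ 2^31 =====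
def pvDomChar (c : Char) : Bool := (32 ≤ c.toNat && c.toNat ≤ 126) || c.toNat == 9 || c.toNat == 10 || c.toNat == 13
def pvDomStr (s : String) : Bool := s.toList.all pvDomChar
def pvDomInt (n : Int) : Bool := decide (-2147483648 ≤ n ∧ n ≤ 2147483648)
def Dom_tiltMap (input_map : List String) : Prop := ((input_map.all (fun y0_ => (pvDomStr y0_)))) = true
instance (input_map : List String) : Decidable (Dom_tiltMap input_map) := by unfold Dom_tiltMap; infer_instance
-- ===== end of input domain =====

-- B replaces A's split/count/reconstruct per line by a single pass with rock/gap counters (idiomatic one-pass roll); same values everywhere.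

-- ===== PORT A =====
-- literal port of A: preallocated [""]*len, enumerate loop, per line a fold over
-- line.split("#") appending "O"*count + "."*(len-count) + "#", then [:-1].
-- (indexing output_map[i] is ported with the total pyGetD/pySetD; i is always in range here)
def tiltMap (input_map : List String) : List String :=
  (PySem.List.enumerate input_map).foldl
    (fun om iline =>
      let i := iline.1
      let line := iline.2
      let s := (PySem.Chars.splitOn line.toList ['#']).foldl
        (fun acc part =>
          let rock := PySem.Chars.count part ['O']
          acc ++ List.replicate rock 'O' ++ List.replicate (part.length - rock) '.' ++ ['#'])
        (PySem.List.pyGetD om i "").toList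
      PySem.List.pySetD om i (String.ofList (PySem.List.slice s none (some (-1)))))
    (PySem.List.pyRepeat [""] (input_map.length : Int))

-- ===== PORT B =====
-- literal port of Source B: one pass per line with (pieces, rocks, gaps); flush on '#', join at the end.
def tiltMap_alt (input_map : List String) : List String :=
  input_map.foldl
    (fun result line =>
      let st := line.toList.foldl
        (fun (st : List (List Char) × Nat × Nat) c =>
          if c = '#' then
            (st.1 ++ [List.replicate st.2.1 'O' ++ List.replicate st.2.2 '.' ++ ['#']], 0, 0)
          else if c = 'O' then (st.1, st.2.1 + 1, st.2.2)
          else (st.1, st.2.1, st.2.2 + 1))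
        ([], 0, 0)
      result ++ [String.ofList (PySem.Chars.join []
        (st.1 ++ [List.replicate st.2.1 'O' ++ List.replicate st.2.2 '.']))])
    []

-- ===== PRECONDITION & SPEC =====
def Spec_tiltMap (input_map : List String) (out : List String) : Prop := out = tiltMap_alt input_map
instance (input_map : List String) (out : List String) : Decidable (Spec_tiltMap input_map out) := by unfold Spec_tiltMap; infer_instance

-- ===== CLAIM (what is proved, stated in full; the proofs are below) =====
def Claim_equal_tiltMap : Prop := ∀ (input_map : List String), Dom_tiltMap input_map → Spec_tiltMap input_map (tiltMap input_map)

-- ===== LEMMAS AND PROOFS =====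

-- A's per-part piece: "O"*count + "."*(len-count) + "#"
def pvPiece (part : List Char) : List Char :=
  List.replicate (PySem.Chars.count part ['O']) 'O' ++
  List.replicate (part.length - PySem.Chars.count part ['O']) '.' ++ ['#']

-- functional model of Python split('#') with a pending (already-read) prefix `pre`
def pvSplit (pre : List Char) : List Char → List (List Char)
  | [] => [pre]
  | c :: rest => if c = '#' then pre :: pvSplit [] rest else pvSplit (pre ++ [c]) rest

-- functional model of B's one-pass roll with counters
def pvBcore (r g : Nat) : List Char → List Char
  | [] => List.replicate r 'O' ++ List.replicate g '.'
  | c :: rest =>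
    if c = '#' then List.replicate r 'O' ++ List.replicate g '.' ++ '#' :: pvBcore 0 0 rest
    else if c = 'O' then pvBcore (r + 1) g rest
    else pvBcore r (g + 1) rest

theorem pv_count_go (fuel : Nat) : ∀ (l : List Char) (acc : Nat), l.length ≤ fuel →
    PySem.Chars.count.go ['O'] fuel l acc = acc + l.count 'O' := by
  induction fuel with
  | zero => intro l acc h; rw [PySem.Chars.count.go.eq_def]; cases l with
    | nil => simp
    | cons c rest => simp at h
  | succ n ih => intro l acc h; rw [PySem.Chars.count.go.eq_def]; cases l with
    | nil => simp
    | cons c rest =>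
      simp only [List.length_cons] at h
      by_cases hc : c = 'O'
      · subst hc
        have h1 : PySem.Chars.count.go ['O'] n rest (acc + 1)
            = acc + 1 + rest.count 'O' := ih rest (acc + 1) (by omega)
        simp only [List.isPrefixOf, BEq.rfl, Bool.true_and, if_true, List.count_cons]
        simp
        omega
      · have hbeq : (('O' : Char) == c) = false := by
          rw [beq_eq_false_iff_ne]; exact fun h' => hc h'.symm
        have h1 : PySem.Chars.count.go ['O'] n rest acc = acc + rest.count 'O' :=
          ih rest acc (by omega)
        simp only [List.isPrefixOf, hbeq, Bool.false_and, h1, List.count_cons]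
        simp
        exact hc

theorem pv_count_O (l : List Char) : PySem.Chars.count l ['O'] = l.count 'O' := by
  rw [PySem.Chars.count]; simp [List.isEmpty]
  have := pv_count_go l.length l 0 (le_refl _)
  omega

theorem pv_splitOn_go (fuel : Nat) : ∀ (l cur : List Char) (acc : List (List Char)),
    l.length < fuel →
    PySem.Chars.splitOn.go ['#'] fuel l cur acc = acc.reverse ++ pvSplit cur.reverse l := by
  induction fuel with
  | zero => intro l cur acc h; omega
  | succ n ih => intro l cur acc h; rw [PySem.Chars.splitOn.go.eq_def]; cases l with
    | nil => simp [pvSplit]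
    | cons c rest =>
      dsimp only
      simp only [List.length_cons] at h
      by_cases hc : c = '#'
      · subst hc
        have hp : List.isPrefixOf ['#'] ('#' :: rest) = true := by simp [List.isPrefixOf]
        rw [if_pos hp]
        rw [ih _ _ _ (by simpa using h)]
        simp [pvSplit]
      · have hp : List.isPrefixOf ['#'] (c :: rest) = false := by
          simp [List.isPrefixOf]; exact fun h' => hc h'.symm
        rw [if_neg (by simp [hp])]
        rw [ih _ _ _ (by omega)]
        simp [pvSplit, hc]

theorem pv_splitOn (l : List Char) : PySem.Chars.splitOn l ['#'] = pvSplit [] l := by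
  rw [PySem.Chars.splitOn]
  rw [pv_splitOn_go (l.length + 1) l [] [] (by omega)]
  simp

theorem pv_foldl_piece (parts : List (List Char)) : ∀ (init : List Char),
    parts.foldl
      (fun acc part =>
        acc ++ List.replicate (PySem.Chars.count part ['O']) 'O' ++
          List.replicate (part.length - PySem.Chars.count part ['O']) '.' ++ ['#']) init
      = init ++ parts.flatMap pvPiece := by
  induction parts with
  | nil => intro init; simp
  | cons p ps ih => intro init; simp only [List.foldl_cons, List.flatMap_cons, ih, pvPiece]
                    simp

theorem pvSplit_hash (pre rest : List Char) :
    pvSplit pre ('#' :: rest) = pre :: pvSplit [] rest := by simp [pvSplit]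

theorem pvSplit_cons {c : Char} (h : c ≠ '#') (pre rest : List Char) :
    pvSplit pre (c :: rest) = pvSplit (pre ++ [c]) rest := by simp [pvSplit, h]

theorem pvBcore_hash (r g : Nat) (rest : List Char) :
    pvBcore r g ('#' :: rest)
      = List.replicate r 'O' ++ List.replicate g '.' ++ '#' :: pvBcore 0 0 rest := by
  simp [pvBcore]

theorem pvBcore_O (r g : Nat) (rest : List Char) :
    pvBcore r g ('O' :: rest) = pvBcore (r + 1) g rest := by simp [pvBcore]

theorem pvBcore_other {c : Char} (h1 : c ≠ '#') (h2 : c ≠ 'O') (r g : Nat) (rest : List Char) :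
    pvBcore r g (c :: rest) = pvBcore r (g + 1) rest := by simp [pvBcore, h1, h2]

theorem pv_split_flatMap (l : List Char) : ∀ (pre : List Char),
    (pvSplit pre l).flatMap pvPiece
      = pvBcore (pre.count 'O') (pre.length - pre.count 'O') l ++ ['#'] := by
  induction l with
  | nil =>
    intro pre
    simp [pvSplit, pvBcore, pvPiece, pv_count_O]
  | cons c rest ih =>
    intro pre
    by_cases hc : c = '#'
    · subst hc
      rw [pvSplit_hash, pvBcore_hash, List.flatMap_cons, ih []]
      simp [pvPiece, pv_count_O]
    · by_cases ho : c = 'O'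
      · subst ho
        rw [pvSplit_cons hc, ih (pre ++ ['O'])]
        have h1 : (pre ++ ['O']).count 'O' = pre.count 'O' + 1 := by
          simp [List.count_append]
        rw [h1]
        have h2 : (pre ++ ['O']).length - (pre.count 'O' + 1) = pre.length - pre.count 'O' := by
          simp only [List.length_append, List.length_cons, List.length_nil]
          omega
        rw [h2, pvBcore_O]
      · rw [pvSplit_cons hc, ih (pre ++ [c])]
        have h1 : (pre ++ [c]).count 'O' = pre.count 'O' := by
          simp only [List.count_append, List.count_eq_zero, Nat.add_eq_left]
          simp only [List.mem_singleton]
          exact fun h' => ho h'.symm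
        rw [h1]
        have h2 : (pre ++ [c]).length - pre.count 'O' = pre.length - pre.count 'O' + 1 := by
          have := List.count_le_length (l := pre) (a := 'O')
          simp only [List.length_append, List.length_cons, List.length_nil]
          omega
        rw [h2, pvBcore_other hc ho]

-- A's per-line value equals pvBcore 0 0
theorem pv_lineA (line : List Char) :
    PySem.List.slice
      ((PySem.Chars.splitOn line ['#']).foldl
        (fun acc part =>
          acc ++ List.replicate (PySem.Chars.count part ['O']) 'O' ++
            List.replicate (part.length - PySem.Chars.count part ['O']) '.' ++ ['#']) [])
      none (some (-1)) = pvBcore 0 0 line := by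
  rw [pv_splitOn, pv_foldl_piece, List.nil_append]
  rw [pv_split_flatMap line []]
  rw [PySem.List.slice_to_neg_one]
  simp

theorem pv_join_nil_flatten (ps : List (List Char)) :
    PySem.Chars.join [] ps = ps.flatten := by
  induction ps with
  | nil => simp [PySem.Chars.join_nil]
  | cons p qs ih =>
    cases qs with
    | nil => simp [PySem.Chars.join_singleton]
    | cons q rest => rw [PySem.Chars.join_cons_cons]; simp_all

-- B's per-line invariant
theorem pv_lineB_inv (line : List Char) : ∀ (pieces : List (List Char)) (r g : Nat),
    (let st := line.foldl
        (fun (st : List (List Char) × Nat × Nat) c =>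
          if c = '#' then
            (st.1 ++ [List.replicate st.2.1 'O' ++ List.replicate st.2.2 '.' ++ ['#']], 0, 0)
          else if c = 'O' then (st.1, st.2.1 + 1, st.2.2)
          else (st.1, st.2.1, st.2.2 + 1))
        (pieces, r, g)
     (st.1 ++ [List.replicate st.2.1 'O' ++ List.replicate st.2.2 '.']).flatten)
      = pieces.flatten ++ pvBcore r g line := by
  induction line with
  | nil => intro pieces r g; simp [pvBcore]
  | cons c rest ih =>
    intro pieces r g
    by_cases hc : c = '#'
    · subst hc
      simp only [List.foldl_cons]
      rw [ih]
      simp [pvBcore]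
    · by_cases ho : c = 'O'
      · subst ho
        simp only [List.foldl_cons, if_neg (by decide : ¬('O' = '#'))]
        rw [ih]
        simp [pvBcore]
      · simp only [List.foldl_cons, if_neg hc, if_neg ho]
        rw [ih]
        simp [pvBcore, hc, ho]

theorem pv_lineB (line : List Char) :
    (let st := line.foldl
        (fun (st : List (List Char) × Nat × Nat) c =>
          if c = '#' then
            (st.1 ++ [List.replicate st.2.1 'O' ++ List.replicate st.2.2 '.' ++ ['#']], 0, 0)
          else if c = 'O' then (st.1, st.2.1 + 1, st.2.2)
          else (st.1, st.2.1, st.2.2 + 1))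
        ([], 0, 0)
     PySem.Chars.join [] (st.1 ++ [List.replicate st.2.1 'O' ++ List.replicate st.2.2 '.']))
      = pvBcore 0 0 line := by
  rw [pv_join_nil_flatten]
  have := pv_lineB_inv line [] 0 0
  simpa using this

-- B = map of the line function
theorem pv_alt_map (input_map : List String) :
    tiltMap_alt input_map = input_map.map (fun line => String.ofList (pvBcore 0 0 line.toList)) := by
  unfold tiltMap_alt
  rw [PySem.List.foldl_append_singleton_eq_map]
  apply List.map_congr_left
  intro line _
  rw [← pv_lineB line.toList]

-- A's enumerate/set loop builds the same map
theorem pv_A_loop (xs : List String) : ∀ (pre : List String),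
    (PySem.List.enumerate xs (pre.length : Int)).foldl
      (fun om iline =>
        let i := iline.1
        let line := iline.2
        let s := (PySem.Chars.splitOn line.toList ['#']).foldl
          (fun acc part =>
            let rock := PySem.Chars.count part ['O']
            acc ++ List.replicate rock 'O' ++ List.replicate (part.length - rock) '.' ++ ['#'])
          (PySem.List.pyGetD om i "").toList
        PySem.List.pySetD om i (String.ofList (PySem.List.slice s none (some (-1)))))
      (pre ++ List.replicate xs.length "")
      = pre ++ xs.map (fun line => String.ofList (pvBcore 0 0 line.toList)) := by
  induction xs with
  | nil => intro pre; simp [PySem.List.enumerate]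
  | cons x xs ih =>
    intro pre
    have henum : PySem.List.enumerate (x :: xs) (pre.length : Int)
        = ((pre.length : Int), x) :: PySem.List.enumerate xs ((pre.length : Int) + 1) := by
      rw [PySem.List.enumerate]
    rw [henum, List.length_cons, List.replicate_succ, List.foldl_cons]
    have hget : PySem.List.pyGetD (pre ++ "" :: List.replicate xs.length "") (pre.length : Int) ""
        = "" := by
      rw [PySem.List.pyGetD_natCast]
      simp [List.getD_eq_getElem?_getD]
    dsimp only
    rw [hget]
    have hline := pv_lineA x.toList
    rw [show ("" : String).toList = [] from rfl]
    rw [hline]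
    rw [PySem.List.pySetD_natCast, List.set_append_right _ _ (Nat.le_refl _)]
    simp only [Nat.sub_self, List.set_cons_zero]
    have hcast : (pre.length : Int) + 1 = ((pre ++ [String.ofList (pvBcore 0 0 x.toList)]).length : Int) := by
      simp
    rw [show pre ++ String.ofList (pvBcore 0 0 x.toList) :: List.replicate xs.length ""
          = (pre ++ [String.ofList (pvBcore 0 0 x.toList)]) ++ List.replicate xs.length "" from by simp,
        hcast, ih (pre ++ [String.ofList (pvBcore 0 0 x.toList)])]
    simp

theorem pv_A_eq_map (input_map : List String) :
    tiltMap input_map = input_map.map (fun line => String.ofList (pvBcore 0 0 line.toList)) := by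
  unfold tiltMap
  have h := pv_A_loop input_map []
  simpa [PySem.List.pyRepeat_singleton] using h

-- ===== VERDICT (by name: the statement is the Claim_ definition above) =====
theorem tiltMap_spec : Claim_equal_tiltMap := by
  intro input_map _
  unfold Spec_tiltMap
  rw [pv_A_eq_map, pv_alt_map]
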